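-- pv_equiv track=rewrite | github.com/jchambers-singlestore/singlestore-oom-parser | oom_parser.py | build_memory_tree
-- ===== SOURCE A (Python) =====
-- def build_memory_tree(event):
--     """Build a hierarchical representation of memory allocations"""
--     allocator_dict = {}
--
--     # Convert to dictionary for easier lookup
--     for key, value in event['allocator_data']:
--         allocator_dict[key] = value
--
--     # Define the hierarchy structure (parent -> children)
--     hierarchy = {
--         'Total_server_memory': [
--             'Alloc_thread_stacks',
--             'Malloc_active_memory',
--             'Buffer_manager_memory',
--             'Total_io_pool_memory',
--             'Alloc_replication_large',
--             'Alloc_durability_large',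
--             'Alloc_mmap_memory',
--             'Alloc_compiled_unit_sections',
--             'Alloc_object_code_images',
--             'Alloc_unit_ifn_thunks',
--             'Alloc_unit_images'
--         ],
--         'Buffer_manager_memory': [
--             'Buffer_manager_cached_memory',
--             'Alloc_query_execution',
--             'Alloc_table_memory'
--         ],
--         'Alloc_table_memory': [
--             'Alloc_skiplist_tower',
--             'Alloc_variable',
--             'Alloc_large_variable',
--             'Alloc_table_primary',
--             'Alloc_deleted_version',
--             'Alloc_internal_key_node',
--             'Alloc_hash_buckets',
--             'Alloc_table_autostats'
--         ]
--     }
--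
--     # Entries that are not included in their parent's memory calculation
--     not_included = ['Alloc_large_variable', 'Alloc_hash_buckets']
--
--     # Build the tree representation
--     tree = []
--
--     def format_entry(key, indent):
--         if key in allocator_dict:
--             return f"{indent}| {key} | {allocator_dict[key]} |"
--         else:
--             return f"{indent}{key} (not found)"
--
--     # Start with the root (Total_server_memory)
--     tree.append(format_entry('Total_server_memory', ""))
--
--     def add_children(parent, indent_prefix=""):
--         if parent not in hierarchy:
--             return
--
--         children = hierarchy[parent]
--         for i, child in enumerate(children):
--             is_last_child = (i == len(children) - 1)
--
--             # Determine the prefix for this child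
--             if is_last_child:
--                 child_prefix = f"{indent_prefix}└─ "
--                 next_level_prefix = f"{indent_prefix}   "
--             else:
--                 child_prefix = f"{indent_prefix}├─ "
--                 next_level_prefix = f"{indent_prefix}│  "
--
--             # Add the child entry
--             if child in allocator_dict:
--                 entry = format_entry(child, child_prefix)
--                 # Add note for items not included in parent calculation
--                 if child in not_included:
--                     entry += f" * NOT included in {parent}"
--                 tree.append(entry)
--
--                 # Add this child's children
--                 add_children(child, next_level_prefix)
--             else:
--                 tree.append(f"{child_prefix}{child} (not found)")
--
--     add_children('Total_server_memory', "")
--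
--     # Add variable buffer information
--     if 'Alloc_variable_cached_buffers' in allocator_dict:
--         tree.append(f"├─ | Alloc_variable_cached_buffers | {allocator_dict['Alloc_variable_cached_buffers']} |")
--
--     if 'Alloc_variable_allocated' in allocator_dict:
--         tree.append(f"└─ | Alloc_variable_allocated | {allocator_dict['Alloc_variable_allocated']} |")
--
--     return tree
-- ===== SOURCE B (Python) =====
-- # Different decomposition: the hierarchy is fixed, so the tree body is a flat
-- # precomputed table of rows (key, prefix, guard ancestors, note suffix) scanned once,
-- # instead of A's recursive descent.
--
-- _ROWS = [
--     ('Alloc_thread_stacks',          '\u251c\u2500 ', (), ''),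
--     ('Malloc_active_memory',         '\u251c\u2500 ', (), ''),
--     ('Buffer_manager_memory',        '\u251c\u2500 ', (), ''),
--     ('Buffer_manager_cached_memory', '\u2502  \u251c\u2500 ', ('Buffer_manager_memory',), ''),
--     ('Alloc_query_execution',        '\u2502  \u251c\u2500 ', ('Buffer_manager_memory',), ''),
--     ('Alloc_table_memory',           '\u2502  \u2514\u2500 ', ('Buffer_manager_memory',), ''),
--     ('Alloc_skiplist_tower',         '\u2502     \u251c\u2500 ', ('Buffer_manager_memory', 'Alloc_table_memory'), ''),
--     ('Alloc_variable',               '\u2502     \u251c\u2500 ', ('Buffer_manager_memory', 'Alloc_table_memory'), ''),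
--     ('Alloc_large_variable',         '\u2502     \u251c\u2500 ', ('Buffer_manager_memory', 'Alloc_table_memory'), ' * NOT included in Alloc_table_memory'),
--     ('Alloc_table_primary',          '\u2502     \u251c\u2500 ', ('Buffer_manager_memory', 'Alloc_table_memory'), ''),
--     ('Alloc_deleted_version',        '\u2502     \u251c\u2500 ', ('Buffer_manager_memory', 'Alloc_table_memory'), ''),
--     ('Alloc_internal_key_node',      '\u2502     \u251c\u2500 ', ('Buffer_manager_memory', 'Alloc_table_memory'), ''),
--     ('Alloc_hash_buckets',           '\u2502     \u251c\u2500 ', ('Buffer_manager_memory', 'Alloc_table_memory'), ' * NOT included in Alloc_table_memory'),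
--     ('Alloc_table_autostats',        '\u2502     \u2514\u2500 ', ('Buffer_manager_memory', 'Alloc_table_memory'), ''),
--     ('Total_io_pool_memory',         '\u251c\u2500 ', (), ''),
--     ('Alloc_replication_large',      '\u251c\u2500 ', (), ''),
--     ('Alloc_durability_large',       '\u251c\u2500 ', (), ''),
--     ('Alloc_mmap_memory',            '\u251c\u2500 ', (), ''),
--     ('Alloc_compiled_unit_sections', '\u251c\u2500 ', (), ''),
--     ('Alloc_object_code_images',     '\u251c\u2500 ', (), ''),
--     ('Alloc_unit_ifn_thunks',        '\u251c\u2500 ', (), ''),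
--     ('Alloc_unit_images',            '\u2514\u2500 ', (), ''),
-- ]
--
--
-- def build_memory_tree(event):
--     alloc = dict(event['allocator_data'])
--
--     def line(key, prefix, note):
--         if key in alloc:
--             return f"{prefix}| {key} | {alloc[key]} |{note}"
--         return f"{prefix}{key} (not found)"
--
--     tree = [line('Total_server_memory', '', '')]
--     for key, prefix, guards, note in _ROWS:
--         if all(g in alloc for g in guards):
--             tree.append(line(key, prefix, note))
--
--     if 'Alloc_variable_cached_buffers' in alloc:
--         tree.append(f"\u251c\u2500 | Alloc_variable_cached_buffers | {alloc['Alloc_variable_cached_buffers']} |")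
--     if 'Alloc_variable_allocated' in alloc:
--         tree.append(f"\u2514\u2500 | Alloc_variable_allocated | {alloc['Alloc_variable_allocated']} |")
--     return tree
-- ===== Notes on version B (the rewrite author's own statement) =====
-- stated objective: alternative
-- what changed: A walks the hierarchy dict with a recursive add_children helper computing branch prefixes on the way down; B scans a single precomputed flat table of rows (key, rendered prefix, guard ancestors, note suffix) once, emitting a row when all its guard ancestors are present.
import Mathlib
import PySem

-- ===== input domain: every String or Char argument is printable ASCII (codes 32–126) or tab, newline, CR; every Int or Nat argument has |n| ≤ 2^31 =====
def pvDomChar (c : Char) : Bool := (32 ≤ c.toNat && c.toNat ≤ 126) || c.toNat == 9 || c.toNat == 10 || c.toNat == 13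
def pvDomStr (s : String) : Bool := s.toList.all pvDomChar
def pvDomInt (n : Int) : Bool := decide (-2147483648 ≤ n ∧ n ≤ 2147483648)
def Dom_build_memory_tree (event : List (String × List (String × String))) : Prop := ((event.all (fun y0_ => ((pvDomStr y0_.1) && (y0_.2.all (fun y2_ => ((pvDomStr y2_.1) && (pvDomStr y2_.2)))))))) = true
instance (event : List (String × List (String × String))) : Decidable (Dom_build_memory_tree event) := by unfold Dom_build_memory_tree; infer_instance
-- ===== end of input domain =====

-- B replaces A's recursive descent over the hierarchy dict by a single scan of a
-- precomputed flat row table (key, prefix, guard ancestors, note); same return value.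

-- ===== PORT A =====

-- format_entry(key, indent); allocator_dict[key] under the `in` check is ported as getD
def pvFmtEntry (ad : PySem.Dict String String) (key indent : String) : String :=
  if ad.contains key then
    indent ++ "| " ++ key ++ " | " ++ ad.getD key "" ++ " |"
  else
    indent ++ key ++ " (not found)"

def pvHierarchy : PySem.Dict String (List String) :=
  PySem.Dict.ofList
    [ ("Total_server_memory",
        [ "Alloc_thread_stacks", "Malloc_active_memory", "Buffer_manager_memory",
          "Total_io_pool_memory", "Alloc_replication_large", "Alloc_durability_large",
          "Alloc_mmap_memory", "Alloc_compiled_unit_sections", "Alloc_object_code_images",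
          "Alloc_unit_ifn_thunks", "Alloc_unit_images" ]),
      ("Buffer_manager_memory",
        [ "Buffer_manager_cached_memory", "Alloc_query_execution", "Alloc_table_memory" ]),
      ("Alloc_table_memory",
        [ "Alloc_skiplist_tower", "Alloc_variable", "Alloc_large_variable",
          "Alloc_table_primary", "Alloc_deleted_version", "Alloc_internal_key_node",
          "Alloc_hash_buckets", "Alloc_table_autostats" ]) ]

def pvNotIncluded : List String := ["Alloc_large_variable", "Alloc_hash_buckets"]

-- add_children(parent, indent_prefix).  The Nat fuel is a totality guard only: the fixed
-- hierarchy has depth 3, so fuel 4 at the top call is never exhausted.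
mutual
def pvAddChildren (ad : PySem.Dict String String) : Nat → String → String → List String
  | 0, _, _ => []
  | fuel + 1, parent, indentPrefix =>
    match pvHierarchy.get? parent with
    | none => []
    | some children => pvGo ad fuel parent indentPrefix children
  termination_by fuel _ _ => (fuel, 0)

-- the `for i, child in enumerate(children)` loop; `i == len(children)-1` ⟺ the tail is []
def pvGo (ad : PySem.Dict String String) : Nat → String → String → List String → List String
  | _, _, _, [] => []
  | fuel, parent, indentPrefix, child :: rest =>
    let childPrefix := if rest = [] then indentPrefix ++ "└─ " else indentPrefix ++ "├─ "
    let nextLevelPrefix := if rest = [] then indentPrefix ++ "   " else indentPrefix ++ "│  "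
    (if ad.contains child then
       (let entry := pvFmtEntry ad child childPrefix
        let entry := if child ∈ pvNotIncluded then entry ++ (" * NOT included in " ++ parent) else entry
        entry :: pvAddChildren ad fuel child nextLevelPrefix)
     else
       [childPrefix ++ child ++ " (not found)"]) ++ pvGo ad fuel parent indentPrefix rest
  termination_by fuel _ _ cs => (fuel, cs.length + 1)
end

def build_memory_tree (event : List (String × List (String × String))) : List String :=
  match (PySem.Dict.ofList event).get? "allocator_data" with
  | none => []   -- Python raises KeyError here; excluded by Pre_build_memory_tree
  | some data =>
    let ad := data.foldl (fun d p => d.insert p.1 p.2) PySem.Dict.empty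
    let tree := [pvFmtEntry ad "Total_server_memory" ""]
    let tree := tree ++ pvAddChildren ad 4 "Total_server_memory" ""
    let tree := if ad.contains "Alloc_variable_cached_buffers" then
        tree ++ ["├─ | Alloc_variable_cached_buffers | " ++ ad.getD "Alloc_variable_cached_buffers" "" ++ " |"]
      else tree
    let tree := if ad.contains "Alloc_variable_allocated" then
        tree ++ ["└─ | Alloc_variable_allocated | " ++ ad.getD "Alloc_variable_allocated" "" ++ " |"]
      else tree
    tree

-- ===== PORT B =====

-- line(key, prefix, note); alloc[key] under the `in` check is ported as getD
def pvLine (ad : PySem.Dict String String) (key pfx note : String) : String :=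
  if ad.contains key then
    pfx ++ "| " ++ key ++ " | " ++ ad.getD key "" ++ " |" ++ note
  else
    pfx ++ key ++ " (not found)"

def pvNote : String := " * NOT included in Alloc_table_memory"

-- _ROWS: (key, prefix, guard ancestors, note suffix)
def pvRows : List (String × String × List String × String) :=
  [ ("Alloc_thread_stacks",          "├─ ", [], ""),
    ("Malloc_active_memory",         "├─ ", [], ""),
    ("Buffer_manager_memory",        "├─ ", [], ""),
    ("Buffer_manager_cached_memory", "│  ├─ ", ["Buffer_manager_memory"], ""),
    ("Alloc_query_execution",        "│  ├─ ", ["Buffer_manager_memory"], ""),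
    ("Alloc_table_memory",           "│  └─ ", ["Buffer_manager_memory"], ""),
    ("Alloc_skiplist_tower",         "│     ├─ ", ["Buffer_manager_memory", "Alloc_table_memory"], ""),
    ("Alloc_variable",               "│     ├─ ", ["Buffer_manager_memory", "Alloc_table_memory"], ""),
    ("Alloc_large_variable",         "│     ├─ ", ["Buffer_manager_memory", "Alloc_table_memory"], pvNote),
    ("Alloc_table_primary",          "│     ├─ ", ["Buffer_manager_memory", "Alloc_table_memory"], ""),
    ("Alloc_deleted_version",        "│     ├─ ", ["Buffer_manager_memory", "Alloc_table_memory"], ""),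
    ("Alloc_internal_key_node",      "│     ├─ ", ["Buffer_manager_memory", "Alloc_table_memory"], ""),
    ("Alloc_hash_buckets",           "│     ├─ ", ["Buffer_manager_memory", "Alloc_table_memory"], pvNote),
    ("Alloc_table_autostats",        "│     └─ ", ["Buffer_manager_memory", "Alloc_table_memory"], ""),
    ("Total_io_pool_memory",         "├─ ", [], ""),
    ("Alloc_replication_large",      "├─ ", [], ""),
    ("Alloc_durability_large",       "├─ ", [], ""),
    ("Alloc_mmap_memory",            "├─ ", [], ""),
    ("Alloc_compiled_unit_sections", "├─ ", [], ""),
    ("Alloc_object_code_images",     "├─ ", [], ""),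
    ("Alloc_unit_ifn_thunks",        "├─ ", [], ""),
    ("Alloc_unit_images",            "└─ ", [], "") ]

def build_memory_tree_alt (event : List (String × List (String × String))) : List String :=
  match (PySem.Dict.ofList event).get? "allocator_data" with
  | none => []   -- Python raises KeyError here; excluded by Pre_build_memory_tree
  | some data =>
    let ad := PySem.Dict.ofList data
    let tree := [pvLine ad "Total_server_memory" "" ""]
    let tree := pvRows.foldl
      (fun t r => if r.2.2.1.all (fun g => ad.contains g) then t ++ [pvLine ad r.1 r.2.1 r.2.2.2] else t)
      tree
    let tree := if ad.contains "Alloc_variable_cached_buffers" then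
        tree ++ ["├─ | Alloc_variable_cached_buffers | " ++ ad.getD "Alloc_variable_cached_buffers" "" ++ " |"]
      else tree
    let tree := if ad.contains "Alloc_variable_allocated" then
        tree ++ ["└─ | Alloc_variable_allocated | " ++ ad.getD "Alloc_variable_allocated" "" ++ " |"]
      else tree
    tree

-- ===== PRECONDITION & SPEC =====
-- Python A raises KeyError unless the event dict has the key 'allocator_data'.
def Pre_build_memory_tree (event : List (String × List (String × String))) : Prop :=
  "allocator_data" ∈ event.map Prod.fst
instance (event : List (String × List (String × String))) : Decidable (Pre_build_memory_tree event) := by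
  unfold Pre_build_memory_tree; infer_instance

def pvWitness_build_memory_tree : (List (String × List (String × String))) :=
  [("allocator_data", [("Total_server_memory", "1024"), ("Buffer_manager_memory", "512")])]

def Spec_build_memory_tree (event : List (String × List (String × String))) (out : List String) : Prop := out = build_memory_tree_alt event
instance (event : List (String × List (String × String))) (out : List String) : Decidable (Spec_build_memory_tree event out) := by unfold Spec_build_memory_tree; infer_instance

-- ===== CLAIM (what is proved, stated in full; the proofs are below) =====
def Claim_equal_build_memory_tree : Prop := ∀ (event : List (String × List (String × String))), Dom_build_memory_tree event → Pre_build_memory_tree event → Spec_build_memory_tree event (build_memory_tree event)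

-- ===== LEMMAS AND PROOFS =====

-- the tree body: root line + recursive descent (A)  =  root line + one scan of the row table (B)
lemma pv_ite_str_append (c : Prop) [Decidable c] (a b s : String) :
    (if c then a else b) ++ s = if c then a ++ s else b ++ s := by split <;> rfl

lemma pv_ite_ite_same {a : Type} (c : Prop) [Decidable c] (x y z : a) :
    (if c then (if c then x else y) else z) = if c then x else z := by split <;> simp [*]

lemma pv_ite_singleton {a : Type} (c : Prop) [Decidable c] (x y : a) :
    (if c then [x] else [y]) = [if c then x else y] := by split <;> rfl

-- pvHierarchy.get? on each key that the traversal reaches, computed once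
lemma pv_hier_total : pvHierarchy.get? "Total_server_memory" = some [ "Alloc_thread_stacks", "Malloc_active_memory", "Buffer_manager_memory", "Total_io_pool_memory", "Alloc_replication_large", "Alloc_durability_large", "Alloc_mmap_memory", "Alloc_compiled_unit_sections", "Alloc_object_code_images", "Alloc_unit_ifn_thunks", "Alloc_unit_images" ] := by decide
lemma pv_hier_buffer : pvHierarchy.get? "Buffer_manager_memory" = some [ "Buffer_manager_cached_memory", "Alloc_query_execution", "Alloc_table_memory" ] := by decide
lemma pv_hier_table : pvHierarchy.get? "Alloc_table_memory" = some [ "Alloc_skiplist_tower", "Alloc_variable", "Alloc_large_variable", "Alloc_table_primary", "Alloc_deleted_version", "Alloc_internal_key_node", "Alloc_hash_buckets", "Alloc_table_autostats" ] := by decide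
lemma pv_hier_leaf0 : pvHierarchy.get? "Alloc_thread_stacks" = none := by decide
lemma pv_hier_leaf1 : pvHierarchy.get? "Malloc_active_memory" = none := by decide
lemma pv_hier_leaf2 : pvHierarchy.get? "Total_io_pool_memory" = none := by decide
lemma pv_hier_leaf3 : pvHierarchy.get? "Alloc_replication_large" = none := by decide
lemma pv_hier_leaf4 : pvHierarchy.get? "Alloc_durability_large" = none := by decide
lemma pv_hier_leaf5 : pvHierarchy.get? "Alloc_mmap_memory" = none := by decide
lemma pv_hier_leaf6 : pvHierarchy.get? "Alloc_compiled_unit_sections" = none := by decide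
lemma pv_hier_leaf7 : pvHierarchy.get? "Alloc_object_code_images" = none := by decide
lemma pv_hier_leaf8 : pvHierarchy.get? "Alloc_unit_ifn_thunks" = none := by decide
lemma pv_hier_leaf9 : pvHierarchy.get? "Alloc_unit_images" = none := by decide
lemma pv_hier_leaf10 : pvHierarchy.get? "Buffer_manager_cached_memory" = none := by decide
lemma pv_hier_leaf11 : pvHierarchy.get? "Alloc_query_execution" = none := by decide
lemma pv_hier_leaf12 : pvHierarchy.get? "Alloc_skiplist_tower" = none := by decide
lemma pv_hier_leaf13 : pvHierarchy.get? "Alloc_variable" = none := by decide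
lemma pv_hier_leaf14 : pvHierarchy.get? "Alloc_large_variable" = none := by decide
lemma pv_hier_leaf15 : pvHierarchy.get? "Alloc_table_primary" = none := by decide
lemma pv_hier_leaf16 : pvHierarchy.get? "Alloc_deleted_version" = none := by decide
lemma pv_hier_leaf17 : pvHierarchy.get? "Alloc_internal_key_node" = none := by decide
lemma pv_hier_leaf18 : pvHierarchy.get? "Alloc_hash_buckets" = none := by decide
lemma pv_hier_leaf19 : pvHierarchy.get? "Alloc_table_autostats" = none := by decide

lemma pv_body_eq (ad : PySem.Dict String String) :
    [pvFmtEntry ad "Total_server_memory" ""] ++ pvAddChildren ad 4 "Total_server_memory" ""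
      = pvRows.foldl
          (fun t r => if (r.2.2.1.all fun g => ad.contains g) = true then t ++ [pvLine ad r.1 r.2.1 r.2.2.2] else t)
          [pvLine ad "Total_server_memory" "" ""] := by
  have hc : forall k, ad.contains k = (ad.get? k).isSome := fun k => PySem.Dict.contains_eq_isSome_get? ..
  cases hB : ad.get? "Buffer_manager_memory" <;> cases hT : ad.get? "Alloc_table_memory" <;>
    simp [pvAddChildren, pvGo, pvRows, pvFmtEntry, pvLine, pvNote, pvNotIncluded,
          pv_hier_total, pv_hier_buffer, pv_hier_table, pv_hier_leaf0, pv_hier_leaf1, pv_hier_leaf2, pv_hier_leaf3, pv_hier_leaf4, pv_hier_leaf5, pv_hier_leaf6, pv_hier_leaf7, pv_hier_leaf8, pv_hier_leaf9, pv_hier_leaf10, pv_hier_leaf11, pv_hier_leaf12, pv_hier_leaf13, pv_hier_leaf14, pv_hier_leaf15, pv_hier_leaf16, pv_hier_leaf17, pv_hier_leaf18, pv_hier_leaf19,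
          hc, hB, hT, pv_ite_str_append, pv_ite_ite_same, pv_ite_singleton]

-- ===== VERDICT (by name: the statement is the Claim_ definition above) =====
theorem build_memory_tree_spec : Claim_equal_build_memory_tree := by
  intro event _ _
  unfold Spec_build_memory_tree build_memory_tree build_memory_tree_alt
  cases h : (PySem.Dict.ofList event).get? "allocator_data" with
  | none => rfl
  | some data =>
    simp only []
    rw [show data.foldl (fun d p => d.insert p.1 p.2) PySem.Dict.empty = PySem.Dict.ofList data from rfl]
    rw [pv_body_eq]
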